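-- pv_equiv track=rewrite | github.com/ritik-sri/LeetCode-Problem-Solution-in-PYTHON | Boundary traversal of matrix - GFG/boundary-traversal-of-matrix.py | BoundaryTraversal
-- ===== SOURCE A (Python) =====
-- def BoundaryTraversal(matrix, n, m):
--     ans = []
--     # Base condition: if the matrix has only one element
--     if n == 1 and m == 1:
--         return [matrix[0][0]]
--
--     # Boundary traversal logic
--     for i in range(m):
--         ans.append(matrix[0][i])
--     for i in range(1, n):
--         ans.append(matrix[i][-1])
--     if n > 1:
--         for i in range(m - 2, -1, -1):
--             ans.append(matrix[n - 1][i])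
--     if m > 1:
--         for i in range(n - 2, 0, -1):
--             ans.append(matrix[i][0])
--     return ans
-- ===== SOURCE B (Python) =====
-- def BoundaryTraversal(matrix, n, m):
--     # Single pass: segment lengths of the clockwise perimeter computed up front,
--     # the k-th boundary cell's coordinates computed by closed-form arithmetic.
--     t = max(m, 0)                            # top row
--     r = max(n - 1, 0)                        # right column (rows 1..n-1)
--     b = max(m - 1, 0) if n > 1 else 0        # bottom row, right to left
--     l = max(n - 2, 0) if m > 1 else 0        # left column, bottom to top
--     out = []
--     for k in range(t + r + b + l):
--         if k < t:
--             i, j = 0, k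
--         elif k < t + r:
--             i, j = k - t + 1, -1
--         elif k < t + r + b:
--             i, j = n - 1, m - 2 - (k - t - r)
--         else:
--             i, j = n - 2 - (k - t - r - b), 0
--         out.append(matrix[i][j])
--     return out
-- ===== Notes on version B (the rewrite author's own statement) =====
-- stated objective: alternative
-- what changed: Replaces A's four fixed index-range loops (top, right, bottom-reversed, left-reversed) by a single pass over k in range(total boundary cells) with precomputed perimeter segment lengths and a closed-form k -> (i,j) coordinate map.
import Mathlib
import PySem

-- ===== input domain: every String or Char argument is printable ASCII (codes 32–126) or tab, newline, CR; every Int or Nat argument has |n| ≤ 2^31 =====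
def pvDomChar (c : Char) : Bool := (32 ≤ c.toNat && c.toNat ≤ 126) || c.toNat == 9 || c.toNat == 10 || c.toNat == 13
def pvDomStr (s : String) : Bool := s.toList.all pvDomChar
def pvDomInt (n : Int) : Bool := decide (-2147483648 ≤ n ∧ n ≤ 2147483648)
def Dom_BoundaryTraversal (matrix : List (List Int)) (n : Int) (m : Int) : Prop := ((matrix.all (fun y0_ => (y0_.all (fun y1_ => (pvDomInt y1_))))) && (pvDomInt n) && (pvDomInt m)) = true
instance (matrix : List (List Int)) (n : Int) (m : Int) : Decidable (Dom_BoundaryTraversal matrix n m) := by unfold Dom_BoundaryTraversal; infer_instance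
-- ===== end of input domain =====

-- B replaces A's four fixed index loops by one pass over k with precomputed perimeter segment
-- lengths and a closed-form k ↦ (i,j) coordinate map (objective: alternative decomposition).

-- ===== PORT A =====
def BoundaryTraversal (matrix : List (List Int)) (n : Int) (m : Int) : List Int :=
  if n = 1 ∧ m = 1 then
    [PySem.List.pyGetD (PySem.List.pyGetD matrix 0 []) 0 0]
  else
    let ans : List Int := []
    let ans := (PySem.List.pyRange 0 m 1).foldl
      (fun acc i => acc ++ [PySem.List.pyGetD (PySem.List.pyGetD matrix 0 []) i 0]) ans
    let ans := (PySem.List.pyRange 1 n 1).foldl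
      (fun acc i => acc ++ [PySem.List.pyGetD (PySem.List.pyGetD matrix i []) (-1) 0]) ans
    let ans := if n > 1 then
      (PySem.List.pyRange (m - 2) (-1) (-1)).foldl
        (fun acc i => acc ++ [PySem.List.pyGetD (PySem.List.pyGetD matrix (n - 1) []) i 0]) ans
      else ans
    let ans := if m > 1 then
      (PySem.List.pyRange (n - 2) 0 (-1)).foldl
        (fun acc i => acc ++ [PySem.List.pyGetD (PySem.List.pyGetD matrix i []) 0 0]) ans
      else ans
    ans

-- ===== PORT B =====
-- loop body of Source B: closed-form coordinates of the k-th boundary cell, then the lookup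
def pvAltCell (matrix : List (List Int)) (n m t r b k : Int) : Int :=
  let ij : Int × Int :=
    if k < t then (0, k)
    else if k < t + r then (k - t + 1, -1)
    else if k < t + r + b then (n - 1, m - 2 - (k - t - r))
    else (n - 2 - (k - t - r - b), 0)
  PySem.List.pyGetD (PySem.List.pyGetD matrix ij.1 []) ij.2 0

def BoundaryTraversal_alt (matrix : List (List Int)) (n : Int) (m : Int) : List Int :=
  let t := max m 0
  let r := max (n - 1) 0
  let b := if n > 1 then max (m - 1) 0 else 0
  let l := if m > 1 then max (n - 2) 0 else 0
  (PySem.List.pyRange 0 (t + r + b + l) 1).foldl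
    (fun out k => out ++ [pvAltCell matrix n m t r b k]) []

-- ===== PRECONDITION & SPEC =====
-- Pre_: exactly the inputs on which A returns (A raises IndexError when the claimed
-- dimensions n, m reach past the actual rows/row lengths).
def Pre_BoundaryTraversal (matrix : List (List Int)) (n : Int) (m : Int) : Prop :=
  if n = 1 ∧ m = 1 then
    1 ≤ matrix.length ∧ 1 ≤ (matrix.headD []).length
  else
    (1 ≤ m → 1 ≤ matrix.length ∧ m ≤ ((matrix.headD []).length : Int)) ∧
    (2 ≤ n → n ≤ (matrix.length : Int) ∧
      ∀ row ∈ (matrix.drop 1).take (n - 1).toNat, 1 ≤ row.length) ∧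
    (2 ≤ n → 2 ≤ m → m - 1 ≤ ((matrix.getD (n - 1).toNat []).length : Int))
instance (matrix : List (List Int)) (n : Int) (m : Int) : Decidable (Pre_BoundaryTraversal matrix n m) := by
  unfold Pre_BoundaryTraversal; infer_instance
def pvWitness_BoundaryTraversal : List (List Int) × Int × Int := ([[1, 2], [3, 4]], 2, 2)

def Spec_BoundaryTraversal (matrix : List (List Int)) (n : Int) (m : Int) (out : List Int) : Prop := out = BoundaryTraversal_alt matrix n m
instance (matrix : List (List Int)) (n : Int) (m : Int) (out : List Int) : Decidable (Spec_BoundaryTraversal matrix n m out) := by unfold Spec_BoundaryTraversal; infer_instance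

-- ===== CLAIM (what is proved, stated in full; the proofs are below) =====
def Claim_equal_BoundaryTraversal : Prop := ∀ (matrix : List (List Int)) (n : Int) (m : Int), Dom_BoundaryTraversal matrix n m → Pre_BoundaryTraversal matrix n m → Spec_BoundaryTraversal matrix n m (BoundaryTraversal matrix n m)

-- ===== LEMMAS AND PROOFS =====

-- top-row segment
lemma pvSeg1 (matrix : List (List Int)) (n m r b : Int) :
    List.map (fun x => PySem.List.pyGetD (PySem.List.pyGetD matrix 0 []) x 0)
      (PySem.List.pyRange 0 m 1) =
    List.map (pvAltCell matrix n m (max m 0) r b) (PySem.List.pyRange 0 (max m 0) 1) := by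
  by_cases hm : 1 ≤ m
  · rw [(by omega : max m 0 = m)]
    refine List.map_congr_left fun k hk => ?_
    rw [PySem.List.mem_pyRange_one] at hk
    simp only [pvAltCell]
    rw [if_pos (by omega : k < m)]
  · rw [PySem.List.pyRange_one_eq_nil (by omega : m ≤ 0),
        PySem.List.pyRange_one_eq_nil (by omega : max m 0 ≤ 0)]
    rfl

-- right-column segment
lemma pvSeg2 (matrix : List (List Int)) (n m b : Int) :
    List.map (fun x => PySem.List.pyGetD (PySem.List.pyGetD matrix x []) (-1) 0)
      (PySem.List.pyRange 1 n 1) =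
    List.map (pvAltCell matrix n m (max m 0) (max (n - 1) 0) b)
      (PySem.List.pyRange (max m 0) (max m 0 + max (n - 1) 0) 1) := by
  rw [PySem.List.pyRange_one 1 n, PySem.List.pyRange_one (max m 0) (max m 0 + max (n - 1) 0),
      List.map_map, List.map_map,
      (by ring : max m 0 + max (n - 1) 0 - max m 0 = max (n - 1) 0),
      (by omega : (max (n - 1) 0).toNat = (n - 1).toNat)]
  refine List.map_congr_left fun k hk => ?_
  rw [List.mem_range] at hk
  simp only [Function.comp_apply, pvAltCell]
  rw [if_neg (by omega : ¬ (max m 0 + (k : Int) < max m 0)),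
      if_pos (by omega : max m 0 + (k : Int) < max m 0 + max (n - 1) 0)]
  simp only []
  rw [(by ring : max m 0 + (k : Int) - max m 0 + 1 = 1 + (k : Int))]

-- bottom-row segment (present exactly when n > 1)
lemma pvSeg3 (matrix : List (List Int)) (n m b : Int) (hn : n > 1) (hb : b = max (m - 1) 0) :
    List.map (fun x => PySem.List.pyGetD (PySem.List.pyGetD matrix (n - 1) []) x 0)
      (PySem.List.pyRange (m - 2) (-1) (-1)) =
    List.map (pvAltCell matrix n m (max m 0) (max (n - 1) 0) b)
      (PySem.List.pyRange (max m 0 + max (n - 1) 0) (max m 0 + max (n - 1) 0 + b) 1) := by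
  subst hb
  rw [PySem.List.pyRange_neg_one (m - 2) (-1),
      PySem.List.pyRange_one (max m 0 + max (n - 1) 0)
        (max m 0 + max (n - 1) 0 + max (m - 1) 0),
      List.map_map, List.map_map,
      (by ring : max m 0 + max (n - 1) 0 + max (m - 1) 0 - (max m 0 + max (n - 1) 0)
        = max (m - 1) 0),
      (by omega : (max (m - 1) 0).toNat = (m - 1).toNat),
      (by omega : (m - 2 - (-1)).toNat = (m - 1).toNat)]
  refine List.map_congr_left fun k hk => ?_
  rw [List.mem_range] at hk
  simp only [Function.comp_apply, pvAltCell]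
  rw [if_neg (by omega : ¬ (max m 0 + max (n - 1) 0 + (k : Int) < max m 0)),
      if_neg (by omega : ¬ (max m 0 + max (n - 1) 0 + (k : Int) < max m 0 + max (n - 1) 0)),
      if_pos (by omega :
        max m 0 + max (n - 1) 0 + (k : Int) < max m 0 + max (n - 1) 0 + max (m - 1) 0)]
  simp only []
  rw [(by ring :
    m - 2 - (max m 0 + max (n - 1) 0 + (k : Int) - max m 0 - max (n - 1) 0) = m - 2 - (k : Int))]

-- left-column segment (present exactly when m > 1)
lemma pvSeg4 (matrix : List (List Int)) (n m b : Int) (hb : 0 ≤ b) :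
    List.map (fun x => PySem.List.pyGetD (PySem.List.pyGetD matrix x []) 0 0)
      (PySem.List.pyRange (n - 2) 0 (-1)) =
    List.map (pvAltCell matrix n m (max m 0) (max (n - 1) 0) b)
      (PySem.List.pyRange (max m 0 + max (n - 1) 0 + b)
        (max m 0 + max (n - 1) 0 + b + max (n - 2) 0) 1) := by
  rw [PySem.List.pyRange_neg_one (n - 2) 0,
      PySem.List.pyRange_one (max m 0 + max (n - 1) 0 + b)
        (max m 0 + max (n - 1) 0 + b + max (n - 2) 0),
      List.map_map, List.map_map,
      (by ring : max m 0 + max (n - 1) 0 + b + max (n - 2) 0 - (max m 0 + max (n - 1) 0 + b)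
        = max (n - 2) 0),
      (by omega : (max (n - 2) 0).toNat = (n - 2).toNat),
      (by omega : (n - 2 - 0).toNat = (n - 2).toNat)]
  refine List.map_congr_left fun k hk => ?_
  rw [List.mem_range] at hk
  simp only [Function.comp_apply, pvAltCell]
  rw [if_neg (by omega : ¬ (max m 0 + max (n - 1) 0 + b + (k : Int) < max m 0)),
      if_neg (by omega : ¬ (max m 0 + max (n - 1) 0 + b + (k : Int) < max m 0 + max (n - 1) 0)),
      if_neg (by omega :
        ¬ (max m 0 + max (n - 1) 0 + b + (k : Int) < max m 0 + max (n - 1) 0 + b))]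
  simp only []
  rw [(by ring :
    n - 2 - (max m 0 + max (n - 1) 0 + b + (k : Int) - max m 0 - max (n - 1) 0 - b)
      = n - 2 - (k : Int))]

-- ===== VERDICT (by name: the statement is the Claim_ definition above) =====
theorem BoundaryTraversal_spec : Claim_equal_BoundaryTraversal := by
  intro matrix n m _ _
  unfold Spec_BoundaryTraversal BoundaryTraversal BoundaryTraversal_alt
  simp only [PySem.List.foldl_append_singleton_eq_map, List.nil_append]
  by_cases h11 : n = 1 ∧ m = 1
  · obtain ⟨hn, hm⟩ := h11
    subst hn; subst hm
    rw [if_pos ⟨rfl, rfl⟩]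
    norm_num [pvAltCell, PySem.List.pyRange_one, List.range_succ]
  · rw [if_neg h11]
    by_cases hb : n > 1 <;> by_cases hl : m > 1
    · rw [if_pos hb, if_pos hb, if_pos hl, if_pos hl]
      rw [PySem.List.pyRange_one_append 0 (max m 0)
            (max m 0 + max (n - 1) 0 + max (m - 1) 0 + max (n - 2) 0) (by omega) (by omega),
          PySem.List.pyRange_one_append (max m 0) (max m 0 + max (n - 1) 0)
            (max m 0 + max (n - 1) 0 + max (m - 1) 0 + max (n - 2) 0) (by omega) (by omega),
          PySem.List.pyRange_one_append (max m 0 + max (n - 1) 0)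
            (max m 0 + max (n - 1) 0 + max (m - 1) 0)
            (max m 0 + max (n - 1) 0 + max (m - 1) 0 + max (n - 2) 0) (by omega) (by omega)]
      simp only [List.map_append, List.append_assoc]
      congr 1
      · exact pvSeg1 matrix n m _ _
      congr 1
      · exact pvSeg2 matrix n m _
      congr 1
      · exact pvSeg3 matrix n m _ hb rfl
      · exact pvSeg4 matrix n m _ (by omega)
    · rw [if_pos hb, if_pos hb, if_neg hl, if_neg hl,
          (by omega : max m 0 + max (n - 1) 0 + max (m - 1) 0 + 0
            = max m 0 + max (n - 1) 0 + max (m - 1) 0)]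
      rw [PySem.List.pyRange_one_append 0 (max m 0)
            (max m 0 + max (n - 1) 0 + max (m - 1) 0) (by omega) (by omega),
          PySem.List.pyRange_one_append (max m 0) (max m 0 + max (n - 1) 0)
            (max m 0 + max (n - 1) 0 + max (m - 1) 0) (by omega) (by omega)]
      simp only [List.map_append, List.append_assoc]
      congr 1
      · exact pvSeg1 matrix n m _ _
      congr 1
      · exact pvSeg2 matrix n m _
      · exact pvSeg3 matrix n m _ hb rfl
    · rw [if_neg hb, if_neg hb, if_pos hl, if_pos hl,
          PySem.List.pyRange_neg_one_eq_nil (by omega : n - 2 ≤ 0),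
          (by omega : max m 0 + max (n - 1) 0 + 0 + max (n - 2) 0
            = max m 0 + max (n - 1) 0)]
      simp only [List.map_nil, List.append_nil]
      rw [PySem.List.pyRange_one_append 0 (max m 0)
            (max m 0 + max (n - 1) 0) (by omega) (by omega)]
      simp only [List.map_append]
      congr 1
      · exact pvSeg1 matrix n m _ _
      · exact pvSeg2 matrix n m _
    · rw [if_neg hb, if_neg hb, if_neg hl, if_neg hl,
          (by omega : max m 0 + max (n - 1) 0 + 0 + 0 = max m 0 + max (n - 1) 0)]
      rw [PySem.List.pyRange_one_append 0 (max m 0)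
            (max m 0 + max (n - 1) 0) (by omega) (by omega)]
      simp only [List.map_append]
      congr 1
      · exact pvSeg1 matrix n m _ _
      · exact pvSeg2 matrix n m _
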